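-- pv_equiv track=rewrite | github.com/S-Shah-Lab/eeg_tools | MotorImageryTools.py | find_ch_symmetry
-- ===== SOURCE A (Python) =====
-- def find_ch_symmetry(ch_location=None, ch_list=None):
--     """
--     Identifies pairs of electrodes that are symmetric about the Y-axis.
--
--     Args:
--         ch_location (list of tuples): Each tuple contains an electrode's name and its X, Y coordinates.
--         ch_list (list): Optional. A list of specific electrodes to consider for symmetry pairing.
--                         If not provided, all electrodes are considered.
--
--     Returns:
--         dict: A dictionary where each key-value pair represents a pair of electrode names
--     """
--     # Default to using all electrodes if no specific list is provided
--     if not ch_list: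
--         ch_list = [x[0] for x in ch_location]
--     symmetry = {}  # Initialize dictionary to hold symmetric electrode pairs
--     # Check each electrode against all others for symmetry
--     for x in ch_location:
--         if x[0].lower() in [ch.lower() for ch in ch_list]:
--             ch1, x1, y1 = x  # Current electrode and its coordinates
--             for y in ch_location:
--                 ch2, x2, y2 = y  # Potential symmetric electrode and its coordinates
--                 # Check for symmetry about the Y-axis
--                 if x1 == -x2 and y1 == y2:
--                     symmetry[ch1] = ch2  # Record symmetric pair
--     return symmetry
-- ===== SOURCE B (Python) =====
-- def find_ch_symmetry(ch_location=None, ch_list=None):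
--     # One pass with a hash index: map each coordinate (x, y) to the name of its
--     # last occurrence, then look up (-x, y) for each allowed electrode.
--     if not ch_list:
--         ch_list = [x[0] for x in ch_location]
--     allowed = {ch.lower() for ch in ch_list}
--     pos = {}
--     for ch2, x2, y2 in ch_location:
--         pos[(x2, y2)] = ch2  # last occurrence wins, like A's overwriting inner loop
--     symmetry = {}
--     for ch1, x1, y1 in ch_location:
--         if ch1.lower() in allowed:
--             mate = pos.get((-x1, y1))
--             if mate is not None:
--                 symmetry[ch1] = mate
--     return symmetry
-- ===== Notes on version B (the rewrite author's own statement) =====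
-- stated objective: faster
-- what changed: Replaced the nested scan over ch_location (plus a lowered ch_list rebuilt per electrode) with a single coordinate->name hash index keyed by (x,y) storing the last occurrence, a precomputed lowered set of ch_list, and one lookup of (-x,y) per electrode.
import Mathlib
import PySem

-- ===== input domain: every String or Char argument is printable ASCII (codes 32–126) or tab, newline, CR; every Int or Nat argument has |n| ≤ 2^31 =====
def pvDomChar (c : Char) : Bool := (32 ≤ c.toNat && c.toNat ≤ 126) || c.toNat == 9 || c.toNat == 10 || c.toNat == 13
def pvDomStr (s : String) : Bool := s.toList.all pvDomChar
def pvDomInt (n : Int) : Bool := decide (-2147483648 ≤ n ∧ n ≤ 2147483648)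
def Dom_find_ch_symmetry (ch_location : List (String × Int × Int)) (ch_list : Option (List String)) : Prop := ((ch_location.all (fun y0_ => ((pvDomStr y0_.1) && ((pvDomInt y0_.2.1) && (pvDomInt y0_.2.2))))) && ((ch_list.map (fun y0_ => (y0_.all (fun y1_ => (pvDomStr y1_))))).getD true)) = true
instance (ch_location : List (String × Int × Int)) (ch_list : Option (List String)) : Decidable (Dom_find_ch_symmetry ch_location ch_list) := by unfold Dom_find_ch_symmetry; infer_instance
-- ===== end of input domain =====

-- B replaces A's quadratic nested scan with a coordinate->name hash index (last occurrence)
-- plus a precomputed lowered set of ch_list: one lookup of (-x, y) per electrode (objective: faster).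

-- ===== PORT A =====
def find_ch_symmetry (ch_location : List (String × Int × Int)) (ch_list : Option (List String)) : List (String × String) :=
  let chl : List String :=
    match ch_list with
    | none => ch_location.map (·.1)
    | some [] => ch_location.map (·.1)
    | some l => l
  (ch_location.foldl (fun sym x =>
    if (chl.map PySem.Str.lower).contains (PySem.Str.lower x.1) then
      ch_location.foldl (fun sym y =>
        if x.2.1 = -y.2.1 ∧ x.2.2 = y.2.2 then sym.insert x.1 y.1 else sym) sym
    else sym) PySem.Dict.empty).items

-- ===== PORT B =====
def find_ch_symmetry_alt (ch_location : List (String × Int × Int)) (ch_list : Option (List String)) : List (String × String) :=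
  -- 'if not ch_list': None and [] both count as falsy
  let chl : List String :=
    if (ch_list.getD []).isEmpty then ch_location.map (·.1) else ch_list.getD []
  let allowed : PySem.Set String := PySem.Set.ofList (chl.map PySem.Str.lower)
  let pos : PySem.Dict (Int × Int) String :=
    ch_location.foldl (fun d y => d.insert (y.2.1, y.2.2) y.1) PySem.Dict.empty
  (ch_location.foldl (fun sym x =>
    if allowed.contains (PySem.Str.lower x.1) then
      match pos.get? (-x.2.1, x.2.2) with
      | some m => sym.insert x.1 m
      | none => sym
    else sym) PySem.Dict.empty).items

-- ===== PRECONDITION & SPEC =====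
def Spec_find_ch_symmetry (ch_location : List (String × Int × Int)) (ch_list : Option (List String)) (out : List (String × String)) : Prop := out = find_ch_symmetry_alt ch_location ch_list
instance (ch_location : List (String × Int × Int)) (ch_list : Option (List String)) (out : List (String × String)) : Decidable (Spec_find_ch_symmetry ch_location ch_list out) := by unfold Spec_find_ch_symmetry; infer_instance

-- ===== CLAIM (what is proved, stated in full; the proofs are below) =====
def Claim_equal_find_ch_symmetry : Prop := ∀ (ch_location : List (String × Int × Int)) (ch_list : Option (List String)), Dom_find_ch_symmetry ch_location ch_list → Spec_find_ch_symmetry ch_location ch_list (find_ch_symmetry ch_location ch_list)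

-- ===== LEMMAS AND PROOFS =====

-- A's inner loop over L, repeatedly overwriting sym[x.1], keeps the last matching name.
theorem innerA_eq_last (L : List (String × Int × Int)) (x : String × Int × Int)
    (sym : PySem.Dict String String) :
    L.foldl (fun sym y =>
        if x.2.1 = -y.2.1 ∧ x.2.2 = y.2.2 then sym.insert x.1 y.1 else sym) sym
    = match (L.reverse.find? (fun y => decide (x.2.1 = -y.2.1 ∧ x.2.2 = y.2.2))).map (·.1) with
      | some m => sym.insert x.1 m
      | none => sym := by
  induction L generalizing sym with
  | nil => rfl
  | cons y ys ih =>
    simp only [List.foldl_cons, List.reverse_cons, List.find?_append]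
    by_cases hp : x.2.1 = -y.2.1 ∧ x.2.2 = y.2.2
    · simp only [if_pos hp, ih]
      cases ys.reverse.find? (fun y => decide (x.2.1 = -y.2.1 ∧ x.2.2 = y.2.2)) with
      | some z => simp [PySem.Dict.insert_insert_self]
      | none => simp [List.find?, hp.1, hp.2]
    · simp only [if_neg hp, ih]
      cases ys.reverse.find? (fun y => decide (x.2.1 = -y.2.1 ∧ x.2.2 = y.2.2)) with
      | some z => simp
      | none => simp [List.find?, hp]

-- The coordinate dict built by B maps c to the name of the last element with coordinates c.
theorem posGet_eq_last (L : List (String × Int × Int)) (d : PySem.Dict (Int × Int) String)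
    (c : Int × Int) :
    (L.foldl (fun d y => d.insert (y.2.1, y.2.2) y.1) d).get? c
    = match L.reverse.find? (fun y => decide ((y.2.1, y.2.2) = c)) with
      | some z => some z.1
      | none => d.get? c := by
  induction L generalizing d with
  | nil => rfl
  | cons y ys ih =>
    simp only [List.foldl_cons, List.reverse_cons, List.find?_append, ih]
    cases ys.reverse.find? (fun y => decide ((y.2.1, y.2.2) = c)) with
    | some z => simp
    | none =>
      by_cases hc : (y.2.1, y.2.2) = c
      · simp [List.find?, hc]
      · simp [List.find?, hc, PySem.Dict.get?_insert, Ne.symm hc]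


-- Outer loops agree for a fixed effective channel list chl.
theorem outer_eq (ch_location : List (String × Int × Int)) (chl : List String) :
    (ch_location.foldl (fun sym x =>
      if (chl.map PySem.Str.lower).contains (PySem.Str.lower x.1) then
        ch_location.foldl (fun sym y =>
          if x.2.1 = -y.2.1 ∧ x.2.2 = y.2.2 then sym.insert x.1 y.1 else sym) sym
      else sym) PySem.Dict.empty).items
    = (ch_location.foldl (fun sym x =>
      if (PySem.Set.ofList (chl.map PySem.Str.lower)).contains (PySem.Str.lower x.1) then
        match (ch_location.foldl (fun d y => d.insert (y.2.1, y.2.2) y.1)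
            PySem.Dict.empty).get? (-x.2.1, x.2.2) with
        | some m => sym.insert x.1 m
        | none => sym
      else sym) PySem.Dict.empty).items := by
  congr 1
  apply PySem.List.foldl_congr_mem
  intro sym x _
  have hguard : (chl.map PySem.Str.lower).contains (PySem.Str.lower x.1)
      = (PySem.Set.ofList (chl.map PySem.Str.lower)).contains (PySem.Str.lower x.1) := by
    simp [PySem.Set.contains, PySem.Set.mem_ofList]
  rw [innerA_eq_last, posGet_eq_last, ← hguard]
  have hpred : (fun y : String × Int × Int => decide ((y.2.1, y.2.2) = (-x.2.1, x.2.2)))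
      = (fun y : String × Int × Int => decide (x.2.1 = -y.2.1 ∧ x.2.2 = y.2.2)) := by
    funext y
    simp only [decide_eq_decide, Prod.mk.injEq]
    constructor
    · rintro ⟨h1, h2⟩; exact ⟨by omega, h2.symm⟩
    · rintro ⟨h1, h2⟩; exact ⟨by omega, h2.symm⟩
  rw [hpred]
  cases ch_location.reverse.find? (fun y => decide (x.2.1 = -y.2.1 ∧ x.2.2 = y.2.2)) with
  | some z => simp [PySem.Dict.get?_empty]
  | none => simp [PySem.Dict.get?_empty]

-- ===== VERDICT (by name: the statement is the Claim_ definition above) =====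
theorem find_ch_symmetry_spec : Claim_equal_find_ch_symmetry := by
  intro ch_location ch_list _
  unfold Spec_find_ch_symmetry find_ch_symmetry find_ch_symmetry_alt
  cases ch_list with
  | none => exact outer_eq ch_location _
  | some l =>
    cases l with
    | nil => exact outer_eq ch_location _
    | cons a as => exact outer_eq ch_location _
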